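-- pv_equiv track=rewrite | github.com/thehalleyyoung/halley-labs | verified-causal-systemic-risk-engine/implementation/causalbound/graph/decomposition.py | _remove_redundant_bags
-- ===== SOURCE A (Python) =====
-- from typing import Any, Dict, FrozenSet, List, Optional, Set, Tuple
--
-- def _remove_redundant_bags(
--     bags: Dict[int, FrozenSet[int]]
-- ) -> Dict[int, FrozenSet[int]]:
--     """Remove bags that are strict subsets of another bag.
--
--     Parameters
--     ----------
--     bags : dict mapping bag id to frozenset
--
--     Returns
--     -------
--     dict
--         Filtered bags.
--     """
--     ids = sorted(bags.keys())
--     keep: Set[int] = set(ids)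
--
--     for i in ids:
--         if i not in keep:
--             continue
--         for j in ids:
--             if j == i or j not in keep:
--                 continue
--             if bags[j] <= bags[i] and bags[j] != bags[i]:
--                 keep.discard(j)
--
--     return {bid: bags[bid] for bid in sorted(keep)}
-- ===== SOURCE B (Python) =====
-- def _remove_redundant_bags(bags):
--     """Keep only the maximal bags: process bags in order of decreasing size,
--     maintaining the list of maximal bags accepted so far; a bag is dropped
--     iff it is a proper subset of an already-accepted (larger) bag."""
--     ordered = sorted(bags.items(), key=lambda p: -len(p[1]))
--     kept = []
--     for i, s in ordered:
--         if not any(s < t for _, t in kept):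
--             kept.append((i, s))
--     return {i: bags[i] for i in sorted(i for i, _ in kept)}
-- ===== Notes on version B (the rewrite author's own statement) =====
-- stated objective: faster
-- what changed: A repeatedly rescans all remaining bags in a nested discard loop over a mutable keep-set; B sorts the bags once by decreasing size and makes a single pass that accepts a bag unless it is a proper subset of an already-accepted maximal bag, then emits the accepted ids in sorted order.
import Mathlib
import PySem

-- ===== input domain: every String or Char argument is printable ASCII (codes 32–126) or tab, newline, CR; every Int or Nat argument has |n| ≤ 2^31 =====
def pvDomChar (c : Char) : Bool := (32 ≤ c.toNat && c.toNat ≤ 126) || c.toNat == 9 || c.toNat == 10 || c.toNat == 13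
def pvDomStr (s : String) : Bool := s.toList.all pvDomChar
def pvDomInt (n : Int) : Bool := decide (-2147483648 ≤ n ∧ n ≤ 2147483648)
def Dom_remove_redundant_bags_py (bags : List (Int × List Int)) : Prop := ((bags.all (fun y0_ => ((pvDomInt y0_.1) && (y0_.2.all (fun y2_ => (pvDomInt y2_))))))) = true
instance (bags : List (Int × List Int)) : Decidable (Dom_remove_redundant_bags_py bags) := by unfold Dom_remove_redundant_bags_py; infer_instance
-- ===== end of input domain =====

-- B rebuilds the result as the maximal bags found by one size-descending scan against the
-- already-accepted maximal bags, instead of A's pairwise discard loops; same return value.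

-- ===== PORT A =====
-- shared input marshalling: the dict[int, frozenset[int]] argument as a PySem.Dict of PySem.Sets
def pvToBags (bags : List (Int × List Int)) : PySem.Dict Int (List Int) :=
  PySem.Dict.ofList (bags.map (fun p => (p.1, PySem.Set.ofList p.2)))

-- body of A's inner 'for j in ids' loop (discards j when bags[j] is a proper subset of bags[i])
def pvAInnerStep (d : PySem.Dict Int (List Int)) (i : Int)
    (keep : PySem.Set Int) (j : Int) : PySem.Set Int :=
  if j == i || !(PySem.Set.contains keep j) then keep
  else if PySem.Set.issubset (d.getD j []) (d.getD i [])
          && !(PySem.Set.equal (d.getD j []) (d.getD i [])) then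
    PySem.Set.discard keep j
  else keep

def pvAInner (d : PySem.Dict Int (List Int)) (ids : List Int) (i : Int)
    (keep : PySem.Set Int) : PySem.Set Int :=
  ids.foldl (pvAInnerStep d i) keep

-- body of A's outer 'for i in ids' loop ('continue' when i was already discarded)
def pvAStep (d : PySem.Dict Int (List Int)) (ids : List Int)
    (keep : PySem.Set Int) (i : Int) : PySem.Set Int :=
  if PySem.Set.contains keep i then pvAInner d ids i keep else keep

def remove_redundant_bags_py (bags : List (Int × List Int)) : List (Int × List Int) :=
  let d := pvToBags bags
  let ids := PySem.List.sorted d.keys (fun x => x) false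
  let keep := ids.foldl (pvAStep d ids) (PySem.Set.ofList ids)
  (PySem.List.sorted keep (fun x => x) false).map (fun bid => (bid, d.getD bid []))

-- ===== PORT B =====
-- one step of B's scan: accept p unless it is a proper subset of an accepted bag
def pvBStep (kept : List (Int × List Int)) (p : Int × List Int) : List (Int × List Int) :=
  if kept.any (fun q => PySem.Set.issubset p.2 q.2 && !(PySem.Set.equal p.2 q.2)) then kept
  else kept ++ [p]

def remove_redundant_bags_py_alt (bags : List (Int × List Int)) : List (Int × List Int) :=
  let d := pvToBags bags
  let ordered := PySem.List.sorted d.items (fun p => -(PySem.Set.len p.2)) false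
  let kept := ordered.foldl pvBStep []
  (PySem.List.sorted (kept.map (fun q => q.1)) (fun x => x) false).map
    (fun i => (i, d.getD i []))

-- ===== PRECONDITION & SPEC =====
def Spec_remove_redundant_bags_py (bags : List (Int × List Int)) (out : List (Int × List Int)) : Prop := out = remove_redundant_bags_py_alt bags
instance (bags : List (Int × List Int)) (out : List (Int × List Int)) : Decidable (Spec_remove_redundant_bags_py bags out) := by unfold Spec_remove_redundant_bags_py; infer_instance

-- ===== CLAIM (what is proved, stated in full; the proofs are below) =====
def Claim_equal_remove_redundant_bags_py : Prop := ∀ (bags : List (Int × List Int)), Dom_remove_redundant_bags_py bags → Spec_remove_redundant_bags_py bags (remove_redundant_bags_py bags)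

-- ===== LEMMAS AND PROOFS =====

-- the value stored for key a (frozenset, as a nodup list)
def pvF (d : PySem.Dict Int (List Int)) (a : Int) : List Int := d.getD a []

-- 'bags[a] is a proper subset of bags[b]'
def pvPsub (d : PySem.Dict Int (List Int)) (a b : Int) : Bool :=
  PySem.Set.issubset (pvF d a) (pvF d b) && !(PySem.Set.equal (pvF d a) (pvF d b))

-- 'bag a is maximal': proper subset of no bag
def pvMax (d : PySem.Dict Int (List Int)) (a : Int) : Bool :=
  d.keys.all (fun b => !(pvPsub d a b))

theorem pvPsub_irrefl (d : PySem.Dict Int (List Int)) (a : Int) : pvPsub d a a = false := by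
  unfold pvPsub
  have : PySem.Set.equal (pvF d a) (pvF d a) = true := by
    rw [PySem.Set.equal_iff]; intro x; rfl
  simp [this]

theorem pvPsub_trans (d : PySem.Dict Int (List Int)) {a b c : Int}
    (h1 : pvPsub d a b = true) (h2 : pvPsub d b c = true) : pvPsub d a c = true := by
  unfold pvPsub at *
  simp only [Bool.and_eq_true, Bool.not_eq_true'] at h1 h2 ⊢
  obtain ⟨hs1, he1⟩ := h1
  obtain ⟨hs2, he2⟩ := h2
  rw [PySem.Set.issubset_iff] at hs1 hs2
  constructor
  · rw [PySem.Set.issubset_iff]; exact fun x hx => hs2 x (hs1 x hx)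
  · rw [Bool.eq_false_iff] at he2 ⊢
    intro hac; apply he2
    rw [PySem.Set.equal_iff] at hac ⊢
    intro x
    exact ⟨fun hx => hs2 x hx, fun hx => hs1 x ((hac x).mpr hx)⟩

theorem pvLen_lt (d : PySem.Dict Int (List Int)) {a b : Int} (hna : (pvF d a).Nodup)
    (h : pvPsub d a b = true) : (pvF d a).length < (pvF d b).length := by
  unfold pvPsub at h
  simp only [Bool.and_eq_true, Bool.not_eq_true'] at h
  obtain ⟨hs, he⟩ := h
  rw [PySem.Set.issubset_iff] at hs
  rw [Bool.eq_false_iff] at he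
  have hx : ∃ x, x ∈ pvF d b ∧ x ∉ pvF d a := by
    by_contra hno
    push Not at hno
    apply he
    rw [PySem.Set.equal_iff]
    intro x
    exact ⟨fun hxa => hs x hxa, fun hxb => by by_contra hxa; exact hxa (hno x hxb)⟩
  obtain ⟨x, hxb, hxa⟩ := hx
  have hsub : (x :: pvF d a).Subperm (pvF d b) := by
    apply List.Nodup.subperm (List.nodup_cons.mpr ⟨hxa, hna⟩)
    intro y hy
    rcases List.mem_cons.mp hy with h | h
    · exact h ▸ hxb
    · exact hs y h
  have := hsub.length_le
  simpa using this

theorem pvVals_nodup (bags : List (Int × List Int)) (a : Int) :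
    (pvF (pvToBags bags) a).Nodup := by
  have hval : ∀ (ps : List (Int × List Int)) (d0 : PySem.Dict Int (List Int)),
      (∀ w ∈ d0.values, w.Nodup) → (∀ p ∈ ps, (p.2 : List Int).Nodup) →
      ∀ w ∈ (d0.update ps).values, w.Nodup := by
    intro ps
    induction ps with
    | nil => intro d0 h0 _ w hw; exact h0 w hw
    | cons p rest ih =>
      intro d0 h0 hps w hw
      have hstep : ∀ w ∈ (d0.insert p.1 p.2).values, w.Nodup := by
        intro w hw
        rcases PySem.Dict.mem_values_insert d0 p.1 p.2 w hw with h | h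
        · exact h ▸ hps p (List.mem_cons_self ..)
        · exact h0 w h
      exact ih (d0.insert p.1 p.2) hstep (fun q hq => hps q (List.mem_cons_of_mem _ hq)) w hw
  unfold pvF pvToBags
  rw [PySem.Dict.getD_eq_get?_getD]
  cases hg : (PySem.Dict.ofList (bags.map fun p => (p.1, PySem.Set.ofList p.2))).get? a with
  | none => simp
  | some v =>
    have hmem := PySem.Dict.mem_items_of_get?_eq_some _ hg
    have hv : v ∈ (PySem.Dict.ofList (bags.map fun p => (p.1, PySem.Set.ofList p.2))).values := by
      rw [PySem.Dict.values]
      exact List.mem_map.mpr ⟨(a, v), hmem, rfl⟩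
    have := hval (bags.map fun p => (p.1, PySem.Set.ofList p.2)) PySem.Dict.empty
      (by intro w hw; simp [PySem.Dict.empty, PySem.Dict.values] at hw)
      (by intro p hp
          rcases List.mem_map.mp hp with ⟨q, _, rfl⟩
          exact PySem.Set.nodup_ofList _) v (by simpa [PySem.Dict.ofList] using hv)
    simpa using this

theorem pvListMax {l : List Int} (f : Int → Nat) (h : l ≠ []) :
    ∃ m ∈ l, ∀ j ∈ l, f j ≤ f m := by
  induction l with
  | nil => exact absurd rfl h
  | cons a rest ih =>
    rcases eq_or_ne rest [] with rfl | hne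
    · exact ⟨a, List.mem_cons_self .., by intro j hj; simp at hj; simp [hj]⟩
    · obtain ⟨m, hm, hmax⟩ := ih hne
      by_cases hc : f a ≤ f m
      · refine ⟨m, List.mem_cons_of_mem _ hm, ?_⟩
        intro j hj
        rcases List.mem_cons.mp hj with rfl | hj
        · exact hc
        · exact hmax j hj
      · refine ⟨a, List.mem_cons_self .., ?_⟩
        intro j hj
        rcases List.mem_cons.mp hj with rfl | hj
        · exact le_refl _
        · exact le_trans (hmax j hj) (le_of_not_ge hc)

-- every non-maximal bag is a proper subset of some MAXIMAL bag
theorem pvKiller (d : PySem.Dict Int (List Int)) (hv : ∀ a, (pvF d a).Nodup) {x : Int}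
    (h : pvMax d x = false) : ∃ i ∈ d.keys, pvPsub d x i = true ∧ pvMax d i = true := by
  unfold pvMax at h
  rw [Bool.eq_false_iff] at h
  have hcand : ∃ b ∈ d.keys, pvPsub d x b = true := by
    by_contra hno
    push Not at hno
    apply h
    rw [List.all_eq_true]
    intro b hb
    simp [hno b hb]
  classical
  set cand := d.keys.filter (fun b => pvPsub d x b) with hcdef
  have hcne : cand ≠ [] := by
    obtain ⟨b, hb, hpb⟩ := hcand
    intro hnil
    have : b ∈ cand := List.mem_filter.mpr ⟨hb, hpb⟩
    simp [hnil] at this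
  obtain ⟨m, hm, hmax⟩ := pvListMax (fun j => (pvF d j).length) hcne
  have hmk := List.mem_filter.mp hm
  refine ⟨m, hmk.1, by simpa using hmk.2, ?_⟩
  unfold pvMax
  rw [List.all_eq_true]
  intro c hc
  simp only [Bool.not_eq_true']
  by_contra hne
  rw [Bool.not_eq_false] at hne
  have hxc : pvPsub d x c = true := pvPsub_trans d (by simpa using hmk.2) hne
  have hcc : c ∈ cand := List.mem_filter.mpr ⟨hc, by simpa using hxc⟩
  have hlt := pvLen_lt d (hv m) hne
  have := hmax c hcc
  omega

-- the inner step's discard condition is pvPsub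
theorem pvAInnerStep_cond (d : PySem.Dict Int (List Int)) (i j : Int) :
    (PySem.Set.issubset (d.getD j []) (d.getD i [])
      && !(PySem.Set.equal (d.getD j []) (d.getD i []))) = pvPsub d j i := rfl

theorem pvAInner_mono (d : PySem.Dict Int (List Int)) (L : List Int) (i : Int)
    (keep : PySem.Set Int) {x : Int} (h : x ∈ pvAInner d L i keep) : x ∈ keep := by
  induction L generalizing keep with
  | nil => simpa [pvAInner] using h
  | cons j L ih =>
    unfold pvAInner at h
    rw [List.foldl_cons] at h
    have hx : x ∈ pvAInnerStep d i keep j := ih (pvAInnerStep d i keep j) h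
    unfold pvAInnerStep at hx
    split_ifs at hx
    · exact hx
    · exact ((PySem.Set.mem_discard keep j x).mp hx).1
    · exact hx

theorem pvAInner_keep (d : PySem.Dict Int (List Int)) (L : List Int) (i : Int)
    (keep : PySem.Set Int) {x : Int} (hx : pvPsub d x i = false) (hm : x ∈ keep) :
    x ∈ pvAInner d L i keep := by
  induction L generalizing keep with
  | nil => simpa [pvAInner]
  | cons j L ih =>
    unfold pvAInner
    rw [List.foldl_cons]
    apply ih
    unfold pvAInnerStep
    split_ifs with h1 h2
    · exact hm
    · rw [pvAInnerStep_cond] at h2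
      refine (PySem.Set.mem_discard keep j x).mpr ⟨hm, ?_⟩
      intro rfl_eq
      rw [rfl_eq] at hx
      rw [hx] at h2
      exact Bool.false_ne_true h2
    · exact hm

theorem pvAInner_drop (d : PySem.Dict Int (List Int)) (L : List Int) (i : Int)
    (keep : PySem.Set Int) {x : Int} (hx : pvPsub d x i = true) (hxL : x ∈ L) :
    x ∉ pvAInner d L i keep := by
  have hxi : x ≠ i := by
    intro rfl_eq
    rw [rfl_eq] at hx
    rw [pvPsub_irrefl] at hx
    exact Bool.false_ne_true hx
  induction L generalizing keep with
  | nil => simp at hxL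
  | cons j L ih =>
    unfold pvAInner
    rw [List.foldl_cons]
    by_cases hj : x = j
    · subst hj
      have hout : x ∉ pvAInnerStep d i keep x := by
        unfold pvAInnerStep
        split_ifs with h1 h2
        · rcases Bool.or_eq_true_iff.mp h1 with h | h
          · exact absurd (by simpa using h) hxi
          · rw [Bool.not_eq_true', Bool.eq_false_iff] at h
            exact fun hmem => h ((PySem.Set.contains_iff keep x).mpr hmem)
        · intro hmem
          exact ((PySem.Set.mem_discard keep x x).mp hmem).2 rfl
        · rw [pvAInnerStep_cond] at h2
          exact absurd hx h2
      intro habs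
      exact hout (pvAInner_mono d L i _ habs)
    · have hxL' : x ∈ L := by
        rcases List.mem_cons.mp hxL with h | h
        · exact absurd h hj
        · exact h
      exact ih (pvAInnerStep d i keep j) hxL'

theorem pvAInner_nodup (d : PySem.Dict Int (List Int)) (L : List Int) (i : Int)
    (keep : PySem.Set Int) (h : keep.Nodup) : (pvAInner d L i keep).Nodup := by
  induction L generalizing keep with
  | nil => simpa [pvAInner]
  | cons j L ih =>
    unfold pvAInner
    rw [List.foldl_cons]
    apply ih
    unfold pvAInnerStep
    split_ifs
    · exact h
    · exact PySem.Set.nodup_discard keep j h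
    · exact h

theorem pvAOuter_mono (d : PySem.Dict Int (List Int)) (ids L : List Int)
    (keep : PySem.Set Int) {x : Int} (h : x ∈ L.foldl (pvAStep d ids) keep) : x ∈ keep := by
  induction L generalizing keep with
  | nil => simpa using h
  | cons i L ih =>
    rw [List.foldl_cons] at h
    have hx := ih (pvAStep d ids keep i) h
    unfold pvAStep at hx
    split_ifs at hx
    · exact pvAInner_mono d ids i keep hx
    · exact hx

theorem pvAOuter_keep (d : PySem.Dict Int (List Int)) (ids L : List Int)
    (keep : PySem.Set Int) {x : Int} (hmax : ∀ i ∈ L, pvPsub d x i = false) (hm : x ∈ keep) :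
    x ∈ L.foldl (pvAStep d ids) keep := by
  induction L generalizing keep with
  | nil => simpa
  | cons i L ih =>
    rw [List.foldl_cons]
    refine ih _ (fun b hb => hmax b (List.mem_cons_of_mem _ hb)) ?_
    unfold pvAStep
    split_ifs
    · exact pvAInner_keep d ids i keep (hmax i (List.mem_cons_self ..)) hm
    · exact hm

theorem pvAOuter_nodup (d : PySem.Dict Int (List Int)) (ids L : List Int)
    (keep : PySem.Set Int) (h : keep.Nodup) : (L.foldl (pvAStep d ids) keep).Nodup := by
  induction L generalizing keep with
  | nil => simpa
  | cons i L ih =>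
    rw [List.foldl_cons]
    apply ih
    unfold pvAStep
    split_ifs
    · exact pvAInner_nodup d ids i keep h
    · exact h

theorem pvAOuter_drop (d : PySem.Dict Int (List Int)) (ids L : List Int)
    (keep : PySem.Set Int) {x i : Int} (hx : pvPsub d x i = true) (hiL : i ∈ L)
    (hik : i ∈ keep) (himax : ∀ b ∈ L, pvPsub d i b = false) (hxids : x ∈ ids) :
    x ∉ L.foldl (pvAStep d ids) keep := by
  obtain ⟨P, R, rfl⟩ := List.append_of_mem hiL
  rw [List.foldl_append, List.foldl_cons]
  have hiS : i ∈ P.foldl (pvAStep d ids) keep := by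
    apply pvAOuter_keep d ids P keep
    · intro b hb
      exact himax b (List.mem_append_left _ hb)
    · exact hik
  set S := P.foldl (pvAStep d ids) keep with hSdef
  have hc : S.contains i = true := (PySem.Set.contains_iff S i).mpr hiS
  have hstep : pvAStep d ids S i = pvAInner d ids i S := by
    unfold pvAStep
    rw [hc]
    simp
  rw [hstep]
  intro habs
  have hxin := pvAOuter_mono d ids R _ habs
  exact pvAInner_drop d ids i _ hx hxids hxin

-- membership in a dict's items list
theorem pvMem_items (d : PySem.Dict Int (List Int)) (hk : d.keys.Nodup) (p : Int × List Int) :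
    p ∈ d.items ↔ p.1 ∈ d.keys ∧ p.2 = d.getD p.1 [] := by
  rw [PySem.Dict.items_eq_map_keys d hk []]
  constructor
  · intro h
    rcases List.mem_map.mp h with ⟨k, hkm, heq⟩
    rcases heq
    exact ⟨hkm, rfl⟩
  · intro ⟨h1, h2⟩
    apply List.mem_map.mpr
    exact ⟨p.1, h1, by rw [← h2]⟩

theorem pvB_mono (L : List (Int × List Int)) (S : List (Int × List Int))
    {q : Int × List Int} (h : q ∈ S) : q ∈ L.foldl pvBStep S := by
  induction L generalizing S with
  | nil => simpa
  | cons p L ih =>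
    rw [List.foldl_cons]
    apply ih
    unfold pvBStep
    split_ifs
    · exact h
    · exact List.mem_append_left _ h

theorem pvB_elems (L : List (Int × List Int)) (S : List (Int × List Int))
    {q : Int × List Int} (h : q ∈ L.foldl pvBStep S) : q ∈ S ∨ q ∈ L := by
  induction L generalizing S with
  | nil => exact Or.inl (by simpa using h)
  | cons p L ih =>
    rw [List.foldl_cons] at h
    rcases ih (pvBStep S p) h with hS | hL
    · unfold pvBStep at hS
      split_ifs at hS
      · exact Or.inl hS
      · rcases List.mem_append.mp hS with h | h
        · exact Or.inl h
        · exact Or.inr (List.mem_cons.mpr (Or.inl (by simpa using h)))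
    · exact Or.inr (List.mem_cons_of_mem _ hL)

theorem pvB_nodup (L : List (Int × List Int)) (S : List (Int × List Int))
    (hS : S.Nodup) (hL : L.Nodup) (hd : ∀ q ∈ S, q ∉ L) : (L.foldl pvBStep S).Nodup := by
  induction L generalizing S with
  | nil => simpa
  | cons p L ih =>
    rw [List.foldl_cons]
    have hnL := (List.nodup_cons.mp hL).2
    have hpL := (List.nodup_cons.mp hL).1
    refine ih (pvBStep S p) ?_ hnL ?_
    · unfold pvBStep
      split_ifs
      · exact hS
      · refine List.Nodup.append hS (by simp) ?_
        intro a haS hap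
        have ha : a = p := by simpa using hap
        subst ha
        exact hd a haS (List.mem_cons_self ..)
    · intro q hq
      unfold pvBStep at hq
      split_ifs at hq
      · exact fun hmem => hd q hq (List.mem_cons_of_mem _ hmem)
      · rcases List.mem_append.mp hq with h | h
        · exact fun hmem => hd q h (List.mem_cons_of_mem _ hmem)
        · have : q = p := by simpa using h
          exact this ▸ hpL

theorem pvB_accept (d : PySem.Dict Int (List Int)) (hk : d.keys.Nodup)
    (L S : List (Int × List Int)) {p : Int × List Int}
    (hS : ∀ q ∈ S, q ∈ d.items) (hL : ∀ q ∈ L, q ∈ d.items)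
    (hp : p ∈ L) (hmax : pvMax d p.1 = true) : p ∈ L.foldl pvBStep S := by
  induction L generalizing S with
  | nil => simp at hp
  | cons q L ih =>
    rw [List.foldl_cons]
    by_cases hq : q = p
    · subst hq
      have hcondF : (S.any (fun r => PySem.Set.issubset q.2 r.2
          && !(PySem.Set.equal q.2 r.2))) = false := by
        rw [Bool.eq_false_iff]
        intro hany
        rcases List.any_eq_true.mp hany with ⟨r, hrS, hcond⟩
        have hr := (pvMem_items d hk r).mp (hS r hrS)
        have hq2 := ((pvMem_items d hk q).mp (hL q (List.mem_cons_self ..))).2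
        have hps : pvPsub d q.1 r.1 = true := by
          unfold pvPsub pvF
          rw [← hq2, ← hr.2]
          exact hcond
        have := List.all_eq_true.mp hmax r.1 hr.1
        rw [hps] at this
        simp at this
      have hadd : pvBStep S q = S ++ [q] := by
        unfold pvBStep
        rw [hcondF]
        simp
      apply pvB_mono
      rw [hadd]
      exact List.mem_append_right _ (List.mem_singleton.mpr rfl)
    · have hp' : p ∈ L := by
        rcases List.mem_cons.mp hp with h | h
        · exact absurd h.symm hq
        · exact h
      refine ih (pvBStep S q) ?_ (fun r hr => hL r (List.mem_cons_of_mem _ hr)) hp'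
      intro r hr
      unfold pvBStep at hr
      split_ifs at hr
      · exact hS r hr
      · rcases List.mem_append.mp hr with h | h
        · exact hS r h
        · have : r = q := by simpa using h
          exact this ▸ hL q (List.mem_cons_self ..)

-- B drops every non-maximal bag
theorem pvB_reject (d : PySem.Dict Int (List Int)) (hv : ∀ a, (pvF d a).Nodup)
    (hk : d.keys.Nodup) {p : Int × List Int}
    (hp : p ∈ PySem.List.sorted d.items (fun p => -(PySem.Set.len p.2)) false)
    (hnm : pvMax d p.1 = false) :
    p ∉ (PySem.List.sorted d.items (fun p => -(PySem.Set.len p.2)) false).foldl pvBStep [] := by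
  have hitems_nodup : d.items.Nodup := by
    rw [PySem.Dict.items_eq_map_keys d hk []]
    exact hk.map (fun a b hab => congrArg Prod.fst hab)
  have hnd : (PySem.List.sorted d.items (fun p => -(PySem.Set.len p.2)) false).Nodup :=
    (PySem.List.sorted_perm d.items _ false).nodup_iff.mpr hitems_nodup
  have hpi := (pvMem_items d hk p).mp
    ((PySem.List.mem_sorted d.items _ false p).mp hp)
  obtain ⟨hp1, hp2⟩ := hpi
  obtain ⟨i, hikeys, hpsub, himax⟩ := pvKiller d hv hnm
  have hine : i ≠ p.1 := by
    intro rfl_eq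
    rw [rfl_eq, pvPsub_irrefl] at hpsub
    exact Bool.false_ne_true hpsub
  set pi : Int × List Int := (i, d.getD i []) with hpidef
  have hpiit : pi ∈ d.items := (pvMem_items d hk pi).mpr ⟨hikeys, rfl⟩
  have hpiord : pi ∈ PySem.List.sorted d.items (fun p => -(PySem.Set.len p.2)) false :=
    (PySem.List.mem_sorted d.items _ false pi).mpr hpiit
  obtain ⟨P, R, hPR⟩ := List.append_of_mem hp
  have hndPR : (P ++ p :: R).Nodup := hPR ▸ hnd
  have hpnP : p ∉ P := by
    intro habs
    have := List.disjoint_of_nodup_append hndPR habs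
    simp at this
  have hpnR : p ∉ R := by
    have := (List.nodup_append.mp hndPR).2.1
    exact (List.nodup_cons.mp this).1
  have hpiP : pi ∈ P := by
    have hmem : pi ∈ P ++ p :: R := hPR ▸ hpiord
    rcases List.mem_append.mp hmem with h | h
    · exact h
    · rcases List.mem_cons.mp h with h | h
      · exact absurd (congrArg Prod.fst h) hine
      · exfalso
        have hpw := PySem.List.sorted_pairwise d.items (fun p => -(PySem.Set.len p.2))
        rw [hPR] at hpw
        have hrel := (List.pairwise_cons.mp (List.pairwise_append.mp hpw).2.1).1 pi h
        have hlt := pvLen_lt d (hv p.1) hpsub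
        have hlp2 : pi.2 = pvF d i := rfl
        rw [hp2] at hrel
        simp only [hlp2, PySem.Set.len] at hrel
        have : (pvF d i).length ≤ (pvF d p.1).length := by
          unfold pvF at hrel ⊢
          omega
        omega
  rw [hPR, List.foldl_append, List.foldl_cons]
  have hPitems : ∀ q ∈ P, q ∈ d.items := by
    intro q hq
    have : q ∈ P ++ p :: R := List.mem_append_left _ hq
    rw [← hPR] at this
    exact (PySem.List.mem_sorted d.items _ false q).mp this
  have hpiS : pi ∈ P.foldl pvBStep [] :=
    pvB_accept d hk P [] (by simp) hPitems hpiP himax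
  set S := P.foldl pvBStep [] with hSdef
  have hany : (S.any
      (fun q => PySem.Set.issubset p.2 q.2 && !(PySem.Set.equal p.2 q.2))) = true := by
    apply List.any_eq_true.mpr
    refine ⟨pi, hpiS, ?_⟩
    have : pi.2 = pvF d i := rfl
    rw [hp2, this]
    exact hpsub
  have hstay : pvBStep S p = S := by
    unfold pvBStep
    rw [hany]
    simp
  rw [hstay]
  intro habs
  rcases pvB_elems R _ habs with h | h
  · rcases pvB_elems P [] h with h' | h'
    · simp at h'
    · exact hpnP h'
  · exact hpnR h

-- A's final keep set holds exactly the maximal bag ids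
theorem pvA_char (d : PySem.Dict Int (List Int)) (hv : ∀ a, (pvF d a).Nodup)
    (hk : d.keys.Nodup) (x : Int) :
    x ∈ (PySem.List.sorted d.keys (fun x => x) false).foldl
        (pvAStep d (PySem.List.sorted d.keys (fun x => x) false))
        (PySem.Set.ofList (PySem.List.sorted d.keys (fun x => x) false))
      ↔ x ∈ d.keys ∧ pvMax d x = true := by
  set ids := PySem.List.sorted d.keys (fun x => x) false with hidsdef
  have hids : ∀ y : Int, y ∈ ids ↔ y ∈ d.keys := by
    intro y
    rw [hidsdef]
    exact PySem.List.mem_sorted d.keys _ false y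
  constructor
  · intro h
    have hx0 : x ∈ PySem.Set.ofList ids := pvAOuter_mono d ids ids _ h
    have hxids : x ∈ ids := (PySem.Set.mem_ofList ids x).mp hx0
    refine ⟨(hids x).mp hxids, ?_⟩
    by_contra hnm
    rw [Bool.not_eq_true] at hnm
    obtain ⟨i, hikeys, hpsub, himax⟩ := pvKiller d hv hnm
    have hdrop := pvAOuter_drop d ids ids (PySem.Set.ofList ids) hpsub
      ((hids i).mpr hikeys)
      ((PySem.Set.mem_ofList ids i).mpr ((hids i).mpr hikeys))
      (fun b hb => by
        have := List.all_eq_true.mp himax b ((hids b).mp hb)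
        simpa using this)
      hxids
    exact hdrop h
  · intro ⟨hxk, hmax⟩
    apply pvAOuter_keep d ids ids
    · intro b hb
      have := List.all_eq_true.mp hmax b ((hids b).mp hb)
      simpa using this
    · exact (PySem.Set.mem_ofList ids x).mpr ((hids x).mpr hxk)

-- B's kept list holds exactly the maximal bag ids
theorem pvB_char (d : PySem.Dict Int (List Int)) (hv : ∀ a, (pvF d a).Nodup)
    (hk : d.keys.Nodup) (x : Int) :
    x ∈ ((PySem.List.sorted d.items (fun p => -(PySem.Set.len p.2)) false).foldl
          pvBStep []).map (fun q => q.1)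
      ↔ x ∈ d.keys ∧ pvMax d x = true := by
  constructor
  · intro h
    rcases List.mem_map.mp h with ⟨q, hq, rfl⟩
    have hqord : q ∈ PySem.List.sorted d.items (fun p => -(PySem.Set.len p.2)) false := by
      rcases pvB_elems _ [] hq with h' | h'
      · simp at h'
      · exact h'
    have hqit := (PySem.List.mem_sorted d.items _ false q).mp hqord
    have hqi := (pvMem_items d hk q).mp hqit
    refine ⟨hqi.1, ?_⟩
    by_contra hnm
    rw [Bool.not_eq_true] at hnm
    exact pvB_reject d hv hk hqord hnm hq
  · intro ⟨hxk, hmax⟩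
    set q : Int × List Int := (x, d.getD x []) with hqdef
    have hqit : q ∈ d.items := (pvMem_items d hk q).mpr ⟨hxk, rfl⟩
    have hqord : q ∈ PySem.List.sorted d.items (fun p => -(PySem.Set.len p.2)) false :=
      (PySem.List.mem_sorted d.items _ false q).mpr hqit
    have hmem := pvB_accept d hk _ [] (by simp)
      (fun r hr => (PySem.List.mem_sorted d.items _ false r).mp hr) hqord hmax
    exact List.mem_map.mpr ⟨q, hmem, rfl⟩

theorem pvA_nodup (d : PySem.Dict Int (List Int)) :
    ((PySem.List.sorted d.keys (fun x => x) false).foldl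
        (pvAStep d (PySem.List.sorted d.keys (fun x => x) false))
        (PySem.Set.ofList (PySem.List.sorted d.keys (fun x => x) false))).Nodup := by
  exact pvAOuter_nodup d _ _ _ (PySem.Set.nodup_ofList _)

theorem pvB_nodup_fst (d : PySem.Dict Int (List Int)) (hk : d.keys.Nodup) :
    (((PySem.List.sorted d.items (fun p => -(PySem.Set.len p.2)) false).foldl
        pvBStep []).map (fun q => q.1)).Nodup := by
  have hitems_nodup : d.items.Nodup := by
    rw [PySem.Dict.items_eq_map_keys d hk []]
    exact hk.map (fun a b hab => congrArg Prod.fst hab)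
  have hnd : (PySem.List.sorted d.items (fun p => -(PySem.Set.len p.2)) false).Nodup :=
    (PySem.List.sorted_perm d.items _ false).nodup_iff.mpr hitems_nodup
  have hkept : ((PySem.List.sorted d.items (fun p => -(PySem.Set.len p.2)) false).foldl
      pvBStep []).Nodup := pvB_nodup _ [] (by simp) hnd (by simp)
  apply List.Nodup.map_on _ hkept
  intro a ha b hb hab
  have hmem : ∀ r, r ∈ (PySem.List.sorted d.items (fun p => -(PySem.Set.len p.2)) false).foldl
      pvBStep [] → r ∈ d.items := by
    intro r hr
    rcases pvB_elems _ [] hr with h' | h'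
    · simp at h'
    · exact (PySem.List.mem_sorted d.items _ false r).mp h'
  have hai := (pvMem_items d hk a).mp (hmem a ha)
  have hbi := (pvMem_items d hk b).mp (hmem b hb)
  have : a.2 = b.2 := by rw [hai.2, hbi.2, hab]
  exact Prod.ext hab this

-- ===== VERDICT (by name: the statement is the Claim_ definition above) =====
theorem remove_redundant_bags_py_spec : Claim_equal_remove_redundant_bags_py := by
  intro bags _
  unfold Spec_remove_redundant_bags_py
  show remove_redundant_bags_py bags = remove_redundant_bags_py_alt bags
  unfold remove_redundant_bags_py remove_redundant_bags_py_alt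
  set d := pvToBags bags with hd
  have hv : ∀ a, (pvF d a).Nodup := fun a => pvVals_nodup bags a
  have hk : d.keys.Nodup := by
    rw [hd]
    unfold pvToBags
    exact PySem.Dict.nodup_keys_ofList _
  have hperm : ((PySem.List.sorted d.keys (fun x => x) false).foldl
        (pvAStep d (PySem.List.sorted d.keys (fun x => x) false))
        (PySem.Set.ofList (PySem.List.sorted d.keys (fun x => x) false))).Perm
      (((PySem.List.sorted d.items (fun p => -(PySem.Set.len p.2)) false).foldl
        pvBStep []).map (fun q => q.1)) := by
    rw [List.perm_ext_iff_of_nodup (pvA_nodup d) (pvB_nodup_fst d hk)]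
    intro a
    rw [pvA_char d hv hk a, pvB_char d hv hk a]
  have hsorted := PySem.List.sorted_eq_sorted_of_perm _ _ (fun x : Int => x)
    (fun a b h => h) hperm
  show (PySem.List.sorted _ (fun x => x) false).map _
      = (PySem.List.sorted _ (fun x => x) false).map _
  rw [hsorted]
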